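-- pv_equiv track=rewrite | github.com/Protype8/PythonCompetitionCodes | codeforces/transform_the_string.py | get_number_of_opreations
-- ===== SOURCE A (Python) =====
-- import string as s
--
-- def get_number_of_opreations(string,favorite_words):
--   total_opreations = 0
--   for letter in string:
--     letter_index =s.ascii_lowercase.index(letter)
--     for i in range(26):
--       if(s.ascii_lowercase[(letter_index+i)%26] in favorite_words):
--         total_opreations += i
--         break
--       letter_index += 26 if letter_index < i else 0
--       if(s.ascii_lowercase[(letter_index-i)%26] in favorite_words):
--         total_opreations += i
--         break
--   return total_opreations
-- ===== SOURCE B (Python) =====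
-- def get_number_of_opreations(string, favorite_words):
--     fav = [c for c in range(26) if chr(97 + c) in favorite_words]
--     dist = [min((min((c - f) % 26, (f - c) % 26) for f in fav), default=0)
--             for c in range(26)]
--     return sum(dist[ord(ch) - 97] for ch in string)
-- ===== Notes on version B (the rewrite author's own statement) =====
-- stated objective: faster
-- what changed: Instead of A's per-character 26-step bidirectional search with a substring scan at each step, B precomputes once a 26-entry table of minimal cyclic distances to the favorite letters and sums table lookups over the string.
import Mathlib
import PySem

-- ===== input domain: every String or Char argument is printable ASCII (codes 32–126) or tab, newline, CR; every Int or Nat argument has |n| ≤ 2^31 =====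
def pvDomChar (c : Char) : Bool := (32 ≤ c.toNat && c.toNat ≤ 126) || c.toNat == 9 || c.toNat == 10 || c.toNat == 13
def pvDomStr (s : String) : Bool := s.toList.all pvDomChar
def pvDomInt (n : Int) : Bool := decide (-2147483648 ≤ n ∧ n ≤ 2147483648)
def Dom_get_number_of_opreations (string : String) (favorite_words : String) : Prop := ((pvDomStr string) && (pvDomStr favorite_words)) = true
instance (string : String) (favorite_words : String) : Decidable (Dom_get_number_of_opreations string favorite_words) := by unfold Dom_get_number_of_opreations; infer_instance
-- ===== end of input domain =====

-- B replaces A's per-character 26-step bidirectional search (substring scan at every step) by a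
-- 26-entry table of minimal cyclic distances computed once, then a sum of table lookups.

-- ===== PORT A =====
-- s.ascii_lowercase
def pvLower : List Char :=
  ['a','b','c','d','e','f','g','h','i','j','k','l','m','n','o','p','q','r','s','t','u','v','w','x','y','z']

-- 's.ascii_lowercase[j % 26] in favorite_words': the left side is a single character, so the
-- Python substring test 'in' is exactly character membership (exact on that one-char case).
def pvMemb (fav : List Char) (j : Int) : Bool :=
  match PySem.List.pyGet? pvLower (PySem.Int.mod j 26) with
  | some c => fav.contains c
  | none => false

-- the inner 'for i in range(26)' loop with its break and the letter_index mutation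
def pvAInner (fav : List Char) : List Int → Int → Int
  | [], _ => 0
  | i :: rest, li =>
    if pvMemb fav (li + i) then i
    else
      let li' := li + (if li < i then (26 : Int) else 0)
      if pvMemb fav (li' - i) then i
      else pvAInner fav rest li'

def get_number_of_opreations (string : String) (favorite_words : String) : Int :=
  string.toList.foldl (fun total letter =>
    match PySem.List.index? pvLower letter with
    | none => total   -- Python raises ValueError here; excluded by Pre_
    | some idx => total + pvAInner favorite_words.toList (PySem.List.pyRange 0 26 1) (Int.ofNat idx)) 0

-- ===== PORT B =====
-- fav = [c for c in range(26) if chr(97 + c) in favorite_words]   (single char: 'in' = membership)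
def pvBFav (favorite_words : String) : List Int :=
  (PySem.List.pyRange 0 26 1).filter (fun c => favorite_words.toList.contains (Char.ofNat ((97 + c).toNat)))

-- min((min((c - f) % 26, (f - c) % 26) for f in fav), default=0)
def pvBDist (fav : List Int) (c : Int) : Int :=
  PySem.List.minD (fav.map (fun f => min (PySem.Int.mod (c - f) 26) (PySem.Int.mod (f - c) 26))) (fun x => x) 0

def get_number_of_opreations_alt (string : String) (favorite_words : String) : Int :=
  let fav := pvBFav favorite_words
  let dist := (PySem.List.pyRange 0 26 1).map (fun c => pvBDist fav c)
  -- sum(dist[ord(ch) - 97] for ch in string); dist[…] raises IndexError off-range (excluded by Pre_)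
  string.toList.foldl (fun total ch => total + (PySem.List.pyGet? dist ((ch.toNat : Int) - 97)).getD 0) 0

-- ===== PRECONDITION & SPEC =====
-- Pre_ excludes exactly the inputs where A raises: ascii_lowercase.index(letter) is a ValueError
-- for any character of `string` outside 'a'..'z'.
def Pre_get_number_of_opreations (string : String) (favorite_words : String) : Prop :=
  string.toList.all (fun ch => pvLower.contains ch) = true
instance (string : String) (favorite_words : String) : Decidable (Pre_get_number_of_opreations string favorite_words) := by unfold Pre_get_number_of_opreations; infer_instance

def pvWitness_get_number_of_opreations : String × String := ("abz", "cx")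

def Spec_get_number_of_opreations (string : String) (favorite_words : String) (out : Int) : Prop := out = get_number_of_opreations_alt string favorite_words
instance (string : String) (favorite_words : String) (out : Int) : Decidable (Spec_get_number_of_opreations string favorite_words out) := by unfold Spec_get_number_of_opreations; infer_instance

-- ===== CLAIM (what is proved, stated in full; the proofs are below) =====
def Claim_equal_get_number_of_opreations : Prop := ∀ (string : String) (favorite_words : String), Dom_get_number_of_opreations string favorite_words → Pre_get_number_of_opreations string favorite_words → Spec_get_number_of_opreations string favorite_words (get_number_of_opreations string favorite_words)

-- ===== LEMMAS AND PROOFS =====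

-- the test A's inner loop evaluates at step i, as a function of the letter's index k only
def pvPb (fav : List Char) (k i : Int) : Bool := pvMemb fav (k + i) || pvMemb fav (k - i)

-- "first i in the list passing pvPb, else 0" — what A's inner loop computes
def pvFirst (fav : List Char) (k : Int) : List Int → Int
  | [] => 0
  | i :: rest => if pvPb fav k i then i else pvFirst fav k rest

lemma pvMod_eq (x : Int) : PySem.Int.mod x 26 = x % 26 :=
  PySem.Int.mod_eq_emod_of_pos (by norm_num)

lemma pvMemb_congr (fav : List Char) {j j' : Int} (h : j % 26 = j' % 26) :
    pvMemb fav j = pvMemb fav j' := by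
  unfold pvMemb
  rw [pvMod_eq, pvMod_eq, h]

lemma pvLower_get (j : Int) (h0 : 0 ≤ j) (h1 : j < 26) :
    PySem.List.pyGet? pvLower j = some (Char.ofNat ((97 + j).toNat)) := by
  interval_cases j <;> decide

lemma mem_pvBFav (fw : String) (f : Int) :
    f ∈ pvBFav fw ↔ 0 ≤ f ∧ f < 26 ∧ fw.toList.contains (Char.ofNat ((97 + f).toNat)) = true := by
  unfold pvBFav
  simp [List.mem_filter, PySem.List.mem_pyRange_one, and_assoc]

lemma pvMemb_mem (fw : String) (j : Int) :
    pvMemb fw.toList j = true ↔ j % 26 ∈ pvBFav fw := by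
  have h0 : 0 ≤ j % 26 := Int.emod_nonneg j (by norm_num)
  have h1 : j % 26 < 26 := Int.emod_lt_of_pos j (by norm_num)
  unfold pvMemb
  rw [pvMod_eq, pvLower_get _ h0 h1, mem_pvBFav]
  simp [h0, h1]

lemma pvAInner_eq_first (fav : List Char) (k : Int) :
    ∀ (l : List Int) (li : Int), li % 26 = k % 26 → pvAInner fav l li = pvFirst fav k l := by
  intro l
  induction l with
  | nil => intro li _; rfl
  | cons i rest ih =>
    intro li hli
    show pvAInner fav (i :: rest) li = pvFirst fav k (i :: rest)
    unfold pvAInner pvFirst pvPb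
    have h1 : pvMemb fav (li + i) = pvMemb fav (k + i) := pvMemb_congr fav (by omega)
    have hli' : (li + (if li < i then (26 : Int) else 0)) % 26 = k % 26 := by
      split <;> omega
    have h2 : pvMemb fav ((li + (if li < i then (26 : Int) else 0)) - i) = pvMemb fav (k - i) :=
      pvMemb_congr fav (by omega)
    simp only [h1, h2]
    by_cases hc1 : pvMemb fav (k + i) = true
    · simp [hc1]
    · by_cases hc2 : pvMemb fav (k - i) = true
      · simp [hc1, hc2]
      · simp [hc1, hc2, ih _ hli']

lemma pvFirst_zero (fav : List Char) (k : Int) :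
    ∀ l : List Int, (∀ i ∈ l, pvPb fav k i = false) → pvFirst fav k l = 0 := by
  intro l
  induction l with
  | nil => intro _; rfl
  | cons i rest ih =>
    intro h
    unfold pvFirst
    rw [h i (by simp)]
    simp [ih (fun j hj => h j (by simp [hj]))]

lemma pvFirst_eq (fav : List Char) (k d : Int) :
    ∀ l : List Int, l.Pairwise (· < ·) → d ∈ l → pvPb fav k d = true →
      (∀ i ∈ l, pvPb fav k i = true → d ≤ i) → pvFirst fav k l = d := by
  intro l
  induction l with
  | nil => intro _ h; exact absurd h (by simp)
  | cons i rest ih =>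
    intro hp hd hPd hmin
    unfold pvFirst
    by_cases hi : pvPb fav k i = true
    · have hdi : d ≤ i := hmin i (by simp) hi
      rcases List.mem_cons.mp hd with rfl | hdr
      · simp [hi]
      · have : i < d := (List.pairwise_cons.mp hp).1 d hdr
        omega
    · have hdr : d ∈ rest := by
        rcases List.mem_cons.mp hd with rfl | hdr
        · exact absurd hPd hi
        · exact hdr
      simp only [hi]
      exact ih (List.pairwise_cons.mp hp).2 hdr hPd
        (fun j hj hPj => hmin j (by simp [hj]) hPj)

lemma mem_pvBFav_bounds {fw : String} {f : Int} (h : f ∈ pvBFav fw) : 0 ≤ f ∧ f < 26 := by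
  have := (mem_pvBFav fw f).mp h
  exact ⟨this.1, this.2.1⟩

-- the heart: A's inner search finds exactly B's tabulated minimal cyclic distance
lemma pvInner_eq_dist (fw : String) (k : Int) (h0 : 0 ≤ k) (h1 : k < 26) :
    pvAInner fw.toList (PySem.List.pyRange 0 26 1) k = pvBDist (pvBFav fw) k := by
  rw [pvAInner_eq_first fw.toList k _ k rfl]
  unfold pvBDist PySem.List.minD
  set m : Int → Int := fun f => min (PySem.Int.mod (k - f) 26) (PySem.Int.mod (f - k) 26) with hm
  cases hmin : PySem.List.min? ((pvBFav fw).map m) (fun x => x) with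
  | none =>
    -- no favorite letters: no i ever passes, A's loop falls through with 0
    have hS : pvBFav fw = [] := by
      have := (PySem.List.min?_eq_none_iff _ _).mp hmin
      simpa using this
    simp only [Option.getD_none]
    apply pvFirst_zero
    intro i _
    unfold pvPb
    simp only [Bool.or_eq_false_iff]
    constructor <;>
    · rw [Bool.eq_false_iff]
      intro hc
      have := (pvMemb_mem fw _).mp hc
      rw [hS] at this
      simp at this
  | some d =>
    simp only [Option.getD_some]
    have hdmem := PySem.List.min?_mem hmin
    have hdmin := PySem.List.min?_isMin hmin
    obtain ⟨f, hf, hfd⟩ := List.mem_map.mp hdmem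
    obtain ⟨hf0, hf1⟩ := mem_pvBFav_bounds hf
    have he1 : PySem.Int.mod (k - f) 26 = (k - f) % 26 := pvMod_eq _
    have he2 : PySem.Int.mod (f - k) 26 = (f - k) % 26 := pvMod_eq _
    have hd0 : 0 ≤ d ∧ d < 26 := by
      rw [← hfd, hm]
      simp only [he1, he2]
      constructor
      · exact le_min (Int.emod_nonneg _ (by norm_num)) (Int.emod_nonneg _ (by norm_num))
      · exact lt_of_le_of_lt (min_le_left _ _) (Int.emod_lt_of_pos _ (by norm_num))
    have hPd : pvPb fw.toList k d = true := by
      unfold pvPb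
      rcases le_total ((k - f) % 26) ((f - k) % 26) with hle | hle
      · -- d = (k - f) % 26 ;  the letter f is reached going DOWN: (k - d) % 26 = f
        have hdv : d = (k - f) % 26 := by rw [← hfd, hm]; simp; omega
        have : (k - d) % 26 = f % 26 := by omega
        have hmem : pvMemb fw.toList (k - d) = true := by
          rw [pvMemb_mem]
          have hf26 : f % 26 = f := by omega
          rw [this, hf26]
          exact hf
        simp [hmem]
      · have hdv : d = (f - k) % 26 := by rw [← hfd, hm]; simp; omega
        have : (k + d) % 26 = f % 26 := by omega
        have hmem : pvMemb fw.toList (k + d) = true := by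
          rw [pvMemb_mem]
          have hf26 : f % 26 = f := by omega
          rw [this, hf26]
          exact hf
        simp [hmem]
    have hminimal : ∀ i ∈ PySem.List.pyRange 0 26 1, pvPb fw.toList k i = true → d ≤ i := by
      intro i hiR hPi
      have hib : 0 ≤ i ∧ i < 26 := by
        have := PySem.List.mem_pyRange_one.mp hiR
        omega
      unfold pvPb at hPi
      rcases Bool.or_eq_true_iff.mp hPi with hc | hc
      · -- a favorite f' = (k + i) % 26 lies i steps UP
        set f' : Int := (k + i) % 26 with hf'
        have hfS : f' ∈ pvBFav fw := by rw [← pvMemb_mem]; exact hc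
        have hmf' : m f' ≤ i := by
          have : (f' - k) % 26 = i := by omega
          calc m f' ≤ PySem.Int.mod (f' - k) 26 := min_le_right _ _
            _ = i := by rw [pvMod_eq]; exact this
        have : d ≤ m f' := hdmin _ (List.mem_map.mpr ⟨f', hfS, rfl⟩)
        omega
      · set f' : Int := (k - i) % 26 with hf'
        have hfS : f' ∈ pvBFav fw := by rw [← pvMemb_mem]; exact hc
        have hmf' : m f' ≤ i := by
          have : (k - f') % 26 = i := by omega
          calc m f' ≤ PySem.Int.mod (k - f') 26 := min_le_left _ _
            _ = i := by rw [pvMod_eq]; exact this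
        have : d ≤ m f' := hdmin _ (List.mem_map.mpr ⟨f', hfS, rfl⟩)
        omega
    exact pvFirst_eq fw.toList k d _ (PySem.List.pairwise_lt_pyRange_one 0 26)
      (PySem.List.mem_pyRange_one.mpr (by omega)) hPd hminimal

lemma pvLower_length : pvLower.length = 26 := by decide

lemma pvLower_toNat : ∀ k : Fin 26, (pvLower[k.1]'(by rw [pvLower_length]; exact k.2)).toNat = 97 + k.1 := by
  decide

-- the per-character step of the two folds agree for a lowercase character
lemma pvLetter_step (fw : String) (acc : Int) (x : Char) (hch : x ∈ pvLower) :
    (match PySem.List.index? pvLower x with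
     | none => acc
     | some idx => acc + pvAInner fw.toList (PySem.List.pyRange 0 26 1) (Int.ofNat idx))
    = acc + (PySem.List.pyGet? ((PySem.List.pyRange 0 26 1).map (fun c => pvBDist (pvBFav fw) c))
        ((x.toNat : Int) - 97)).getD 0 := by
  obtain ⟨k, hk⟩ := Option.isSome_iff_exists.mp ((PySem.List.index?_isSome_iff _ _).mpr hch)
  obtain ⟨hklt, hxk, -⟩ := PySem.List.getElem_of_index?_eq_some hk
  rw [pvLower_length] at hklt
  have hxN : x.toNat = 97 + k := by
    have := pvLower_toNat ⟨k, hklt⟩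
    simp only at this
    rw [← this]
    exact congrArg Char.toNat hxk.symm
  rw [hk]
  show acc + pvAInner fw.toList (PySem.List.pyRange 0 26 1) ((k : Nat) : Int) = _
  have hidx : (x.toNat : Int) - 97 = ((k : Nat) : Int) := by omega
  rw [hidx, PySem.List.pyGet?_natCast,
    show (26 : Int) = ((26 : Nat) : Int) from rfl,
    PySem.List.getElem?_map_pyRange_zero _ 26 k hklt]
  simp only [Option.getD_some]
  congr 1
  exact pvInner_eq_dist fw ((k : Nat) : Int) (by positivity) (by exact_mod_cast hklt)

-- ===== VERDICT (by name: the statement is the Claim_ definition above) =====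
theorem get_number_of_opreations_spec : Claim_equal_get_number_of_opreations := by
  intro s fw _ hpre
  unfold Spec_get_number_of_opreations get_number_of_opreations get_number_of_opreations_alt
  apply PySem.List.foldl_congr_mem
  intro acc x hx
  have hch : x ∈ pvLower := by
    have := List.all_eq_true.mp hpre x hx
    simpa using this
  exact pvLetter_step fw acc x hch
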